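-- pv_equiv track=rewrite | github.com/pranshulsharma-zeeve/zeeve-backend | Custom-odoo-addons/api_swagger_ui/controllers/swagger.py | _extract_doc_fields
-- ===== SOURCE A (Python) =====
-- def _extract_doc_fields(doc):
--     field_docs = {}
--     for line in (doc or "").splitlines():
--         stripped = line.strip()
--         if not stripped.startswith(":param "):
--             continue
--         _, _, remainder = stripped.partition(":param ")
--         name, _, description = remainder.partition(":")
--         name = name.strip()
--         description = description.strip()
--         if name:
--             field_docs[name] = description
--     return field_docs
-- ===== SOURCE B (Python) =====
-- import re
--
-- _PARAM_RE = re.compile(r'\s*:param ([^:]*):?(.*)')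
--
--
-- def _extract_doc_fields(doc):
--     field_docs = {}
--     for line in (doc or "").splitlines():
--         m = _PARAM_RE.fullmatch(line)
--         if m:
--             name = m.group(1).strip()
--             if name:
--                 field_docs[name] = m.group(2).strip()
--     return field_docs
-- ===== Notes on version B (the rewrite author's own statement) =====
-- stated objective: idiomatic
-- what changed: A's hand parsing of each line (strip, startswith test, two partition calls, conditional dict assignment) is replaced by a single compiled regular expression r'\s*:param ([^:]*):?(.*)' fullmatched against each line, with the two capture groups stripped to give the name and description.
import Mathlib
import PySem

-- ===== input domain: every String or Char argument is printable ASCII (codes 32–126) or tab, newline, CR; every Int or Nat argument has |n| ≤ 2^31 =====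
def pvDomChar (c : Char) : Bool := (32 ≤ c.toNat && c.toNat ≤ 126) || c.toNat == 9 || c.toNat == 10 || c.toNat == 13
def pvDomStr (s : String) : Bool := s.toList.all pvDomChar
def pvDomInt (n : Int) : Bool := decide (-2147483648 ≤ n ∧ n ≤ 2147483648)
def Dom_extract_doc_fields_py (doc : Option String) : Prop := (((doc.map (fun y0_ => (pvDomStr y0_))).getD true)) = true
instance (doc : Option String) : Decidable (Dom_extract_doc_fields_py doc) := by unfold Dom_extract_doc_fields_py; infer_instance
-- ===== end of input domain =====

-- B replaces A's strip/startswith/partition hand parsing by one compiled regular expression,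
-- r'\s*:param ([^:]*):?(.*)', fullmatched against each line (objective: idiomatic).

-- ===== PORT A =====
-- str.partition(sep), ported step for step (exact for nonempty sep: first occurrence via find, slices around it)
def pyPartition (s sep : List Char) : List Char × List Char × List Char :=
  let i := PySem.Chars.find s sep
  if i < 0 then (s, [], [])
  else (PySem.List.slice s none (some i), sep, PySem.List.slice s (some (i + sep.length)) none)

def extract_doc_fields_py (doc : Option String) : List (String × String) :=
  let field_docs : PySem.Dict String String := PySem.Dict.empty
  let field_docs := (PySem.Str.splitlines (doc.getD "")).foldl
    (fun (d : PySem.Dict String String) line =>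
      let stripped := (PySem.Str.strip line).toList
      if ¬ PySem.Chars.startswith stripped ":param ".toList then d
      else
        let remainder := (pyPartition stripped ":param ".toList).2.2
        let p := pyPartition remainder ":".toList
        let name := PySem.Chars.strip p.1
        let description := PySem.Chars.strip p.2.2
        if name ≠ [] then d.insert (String.ofList name) (String.ofList description) else d)
    field_docs
  field_docs.items

-- ===== PORT B =====
-- _PARAM_RE.fullmatch(line) for _PARAM_RE = re.compile(r'\s*:param ([^:]*):?(.*)'),
-- ported connective by connective: '\s*' is a maximal whitespace run (deterministic here: the
-- next required char ':' is never whitespace, so the greedy match cannot backtrack), then the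
-- literal ':param ', '([^:]*)' the maximal colon-free run, ':?' one optional colon, and '(.*)'
-- the whole rest of the line (exact on the input domain: lines produced by splitlines contain
-- no '\n', and on the domain's characters '\s' is exactly PySem.Chars.isspace).
def paramFullmatch (line : List Char) : Option (List Char × List Char) :=
  let rest := line.dropWhile PySem.Chars.isspace
  if ":param ".toList <+: rest then
    let rem := rest.drop 7
    let g1 := rem.takeWhile (fun c => c ≠ ':')
    let t := rem.dropWhile (fun c => c ≠ ':')
    let g2 := match t with
      | ':' :: t' => t'          -- ':?' consumes the colon when it is there
      | t' => t'
    some (g1, g2)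
  else none

def extract_doc_fields_py_alt (doc : Option String) : List (String × String) :=
  ((PySem.Str.splitlines (doc.getD "")).foldl
    (fun (d : PySem.Dict String String) line =>
      match paramFullmatch line.toList with
      | none => d
      | some (g1, g2) =>
        let name := PySem.Chars.strip g1
        if name ≠ [] then d.insert (String.ofList name) (String.ofList (PySem.Chars.strip g2))
        else d)
    PySem.Dict.empty).items

-- ===== PRECONDITION & SPEC =====
def Spec_extract_doc_fields_py (doc : Option String) (out : List (String × String)) : Prop := out = extract_doc_fields_py_alt doc
instance (doc : Option String) (out : List (String × String)) : Decidable (Spec_extract_doc_fields_py doc out) := by unfold Spec_extract_doc_fields_py; infer_instance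

-- ===== CLAIM (what is proved, stated in full; the proofs are below) =====
def Claim_equal_extract_doc_fields_py : Prop := ∀ (doc : Option String), Dom_extract_doc_fields_py doc → Spec_extract_doc_fields_py doc (extract_doc_fields_py doc)

-- ===== LEMMAS AND PROOFS =====

-- the sought prefix is at index 0, so find returns 0
lemma find_eq_zero_of_prefix {s sub : List Char} (h : sub <+: s) :
    PySem.Chars.find s sub = 0 := by
  have hnn : 0 ≤ PySem.Chars.find s sub :=
    (PySem.Chars.find_nonneg_iff s sub).2 h.isInfix
  obtain ⟨_, hmin⟩ := PySem.Chars.find_spec hnn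
  by_contra hne
  have hpos : 0 < (PySem.Chars.find s sub).toNat := by omega
  exact hmin 0 hpos (by simpa using h)

-- peeling the matched prefix: stripped.partition(":param ") when stripped startswith ":param "
lemma partition_prefix {s : List Char} (h : ":param ".toList <+: s) :
    (pyPartition s ":param ".toList).2.2 = s.drop 7 := by
  have h0 : PySem.Chars.find s ":param ".toList = 0 := find_eq_zero_of_prefix h
  have hfi : ¬ PySem.Chars.find s ":param ".toList < 0 := by omega
  simp only [pyPartition, h0]
  rw [show (0 : Int) + (":param ".toList.length : Int) = 7 by decide]
  rw [PySem.List.slice_from s (by norm_num : (0:Int) ≤ 7)]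
  rfl
lemma tw_dw_split {α : Type} (p : α → Bool) {u v : List α}
    (hu : ∀ c ∈ u, p c = true) (hv : ∀ (h : v ≠ []), p (v.head h) = false) :
    (u ++ v).takeWhile p = u ∧ (u ++ v).dropWhile p = v := by
  have htu : u.takeWhile p = u := List.takeWhile_eq_self_iff.2 hu
  have hdu : u.dropWhile p = [] := List.dropWhile_eq_nil_iff.2 hu
  cases v with
  | nil =>
    constructor
    · rw [List.append_nil, htu]
    · rw [List.append_nil, hdu]
  | cons c t =>
    have hc : p c = false := hv (by simp)
    constructor
    · rw [List.takeWhile_append, htu, if_pos rfl, List.takeWhile_cons, hc]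
      simp
    · rw [List.dropWhile_append, hdu]
      simp [hc]
lemma partition_colon (s : List Char) :
    (pyPartition s ":".toList).1 = s.takeWhile (fun c => c ≠ ':') ∧
    (pyPartition s ":".toList).2.2 = (s.dropWhile (fun c => c ≠ ':')).drop 1 := by
  have hsc : (":".toList : List Char) = [':'] := rfl
  by_cases hc : ':' ∈ s
  · have hnn : 0 ≤ PySem.Chars.find s [':'] :=
      (PySem.Chars.find_nonneg_iff s [':']).2 ((List.singleton_infix_iff ':' s).2 hc)
    obtain ⟨hpre, hmin⟩ := PySem.Chars.find_spec hnn
    set n := (PySem.Chars.find s [':']).toNat with hn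
    have hlen : n < s.length := by
      by_contra hno
      rw [List.drop_eq_nil_iff.2 (by omega)] at hpre
      simp at hpre
    have hget : s[n] = ':' := by
      have hpre' := hpre
      rw [List.drop_eq_getElem_cons hlen] at hpre'
      obtain ⟨t, ht⟩ := hpre'
      rw [List.singleton_append] at ht
      injection ht with h1 _
      exact h1.symm
    have hdropc : s.drop n = ':' :: s.drop (n + 1) := by
      rw [List.drop_eq_getElem_cons hlen, hget]
    have hu : ∀ c ∈ s.take n, (fun c => decide (c ≠ ':')) c = true := by
      intro c hcm
      obtain ⟨j, hj, rfl⟩ := List.mem_iff_getElem.1 hcm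
      rw [List.getElem_take]
      have hjn : j < n := by simp at hj; omega
      have hjs : j < s.length := by omega
      simp only [decide_eq_true_eq]
      intro hcol
      exact hmin j hjn (by rw [List.drop_eq_getElem_cons hjs, hcol]; exact ⟨_, List.singleton_append ..⟩)
    have hv : ∀ (h : s.drop n ≠ []), (fun c => decide (c ≠ ':')) ((s.drop n).head h) = false := by
      intro h
      have h1 : some ((s.drop n).head h) = some ':' := by
        rw [← List.head?_eq_some_head, hdropc]; rfl
      rw [Option.some.injEq] at h1
      rw [h1]; simp
    obtain ⟨htw, hdw⟩ := tw_dw_split (fun c => decide (c ≠ ':')) hu hv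
    rw [List.take_append_drop] at htw hdw
    have hfi : ¬ PySem.Chars.find s ":".toList < 0 := by rw [hsc]; omega
    have hlen1 : PySem.Chars.find s ":".toList + ((":".toList : List Char).length : Int) = (n : Int) + 1 := by
      rw [hsc]; simp; omega
    constructor
    · simp only [pyPartition, if_neg hfi]
      rw [hsc, PySem.List.slice_to s hnn, htw]
    · simp only [pyPartition, if_neg hfi, hlen1]
      rw [PySem.List.slice_from s (by positivity), hdw, hdropc]
      simp
  · have hfind : PySem.Chars.find s ":".toList = -1 := by
      rw [hsc]
      exact (PySem.Chars.find_eq_neg_one_iff s _).2 (fun h => hc ((List.singleton_infix_iff ':' s).1 h))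
    have htw : s.takeWhile (fun c => decide (c ≠ ':')) = s :=
      List.takeWhile_eq_self_iff.2 (by intro c hcm; simp; rintro rfl; exact hc hcm)
    have hdw : s.dropWhile (fun c => decide (c ≠ ':')) = [] :=
      List.dropWhile_eq_nil_iff.2 (by intro c hcm; simp; rintro rfl; exact hc hcm)
    have hfi : PySem.Chars.find s ":".toList < 0 := by omega
    simp only [pyPartition, if_pos hfi]
    rw [htw, hdw]
    exact ⟨rfl, rfl⟩
lemma strip_of_all_ws {y : List Char} (h : ∀ c ∈ y, PySem.Chars.isspace c = true) :
    PySem.Chars.strip y = [] := by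
  rw [PySem.Chars.strip, PySem.Chars.lstrip, List.dropWhile_eq_nil_iff.2 h]
  rfl

-- rstrip ignores an appended all-whitespace tail
lemma rstrip_append_ws {x w : List Char} (hw : ∀ c ∈ w, PySem.Chars.isspace c = true) :
    PySem.Chars.rstrip (x ++ w) = PySem.Chars.rstrip x := by
  rw [PySem.Chars.rstrip, PySem.Chars.rstrip, List.reverse_append, List.dropWhile_append]
  rw [List.dropWhile_eq_nil_iff.2 (by intro c hcm; exact hw c (List.mem_reverse.1 hcm))]
  simp

-- rstrip of an all-whitespace list is empty
lemma rstrip_of_all_ws {y : List Char} (h : ∀ c ∈ y, PySem.Chars.isspace c = true) :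
    PySem.Chars.rstrip y = [] := by
  rw [PySem.Chars.rstrip,
    List.dropWhile_eq_nil_iff.2 (by intro c hcm; exact h c (List.mem_reverse.1 hcm))]
  rfl

-- strip ignores an appended all-whitespace tail
lemma strip_append_ws {x w : List Char} (hw : ∀ c ∈ w, PySem.Chars.isspace c = true) :
    PySem.Chars.strip (x ++ w) = PySem.Chars.strip x := by
  by_cases hx : x.dropWhile PySem.Chars.isspace = []
  · have h1 : PySem.Chars.lstrip (x ++ w) = w.dropWhile PySem.Chars.isspace := by
      rw [PySem.Chars.lstrip, List.dropWhile_append, hx]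
      simp
    rw [PySem.Chars.strip, h1,
      rstrip_of_all_ws (fun c hcm => hw c ((List.dropWhile_sublist _).subset hcm))]
    rw [PySem.Chars.strip, PySem.Chars.lstrip, hx,
      rstrip_of_all_ws (by intro c hcm; cases hcm)]
  · have h1 : PySem.Chars.lstrip (x ++ w) = PySem.Chars.lstrip x ++ w := by
      rw [PySem.Chars.lstrip, PySem.Chars.lstrip, List.dropWhile_append,
        if_neg (by simpa using hx)]
    rw [PySem.Chars.strip, h1, rstrip_append_ws hw, PySem.Chars.strip]

-- lstrip = strip followed by the trailing whitespace
lemma lstrip_eq_strip_append (s : List Char) :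
    ∃ w, (∀ c ∈ w, PySem.Chars.isspace c = true) ∧
      PySem.Chars.lstrip s = PySem.Chars.strip s ++ w := by
  refine ⟨((PySem.Chars.lstrip s).reverse.takeWhile PySem.Chars.isspace).reverse, ?_, ?_⟩
  · intro c hcm
    exact List.mem_takeWhile_imp (List.mem_reverse.1 hcm)
  · rw [PySem.Chars.strip, PySem.Chars.rstrip, ← List.reverse_append,
      List.takeWhile_append_dropWhile, List.reverse_reverse]

-- the A-side loop body equals the B-side loop body, line by line
lemma step_eq (d : PySem.Dict String String) (line : String) :
    (let stripped := (PySem.Str.strip line).toList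
     if ¬ PySem.Chars.startswith stripped ":param ".toList then d
     else
       let remainder := (pyPartition stripped ":param ".toList).2.2
       let p := pyPartition remainder ":".toList
       let name := PySem.Chars.strip p.1
       let description := PySem.Chars.strip p.2.2
       if name ≠ [] then d.insert (String.ofList name) (String.ofList description) else d)
    = match paramFullmatch line.toList with
      | none => d
      | some (g1, g2) =>
        let name := PySem.Chars.strip g1
        if name ≠ [] then d.insert (String.ofList name) (String.ofList (PySem.Chars.strip g2))
        else d := by
  obtain ⟨w, hw, hLw⟩ := lstrip_eq_strip_append line.toList
  simp only [PySem.Str.toList_strip, paramFullmatch]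
  set S := PySem.Chars.strip line.toList with hS
  have hL : line.toList.dropWhile PySem.Chars.isspace = S ++ w := hLw
  rw [hL]
  by_cases hB : ":param ".toList <+: S ++ w
  · rw [if_pos hB]
    by_cases hA : PySem.Chars.startswith S ":param ".toList
    · -- the line really carries a ':param ' field
      have hPS : ":param ".toList <+: S := (PySem.Chars.startswith_iff _ _).1 hA
      have h7 : 7 ≤ S.length := by
        have := hPS.length_le
        simpa using this
      have hdrop : (S ++ w).drop 7 = S.drop 7 ++ w := List.drop_append_of_le_length h7
      obtain ⟨hp1, hp22⟩ := partition_colon (S.drop 7)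
      simp only [hA, not_true, if_false, partition_prefix hPS, hp1, hp22, hdrop]
      by_cases hc : ':' ∈ S.drop 7
      · -- a colon terminates the name inside the stripped text
        have hdwne : (S.drop 7).dropWhile (fun c => decide (c ≠ ':')) ≠ [] := by
          intro hnil
          have := List.dropWhile_eq_nil_iff.1 hnil ':' hc
          simp at this
        have htwne : ¬ ((S.drop 7).takeWhile (fun c => decide (c ≠ ':'))).length = (S.drop 7).length := by
          intro hlen
          have heq : (S.drop 7).takeWhile (fun c => decide (c ≠ ':')) = S.drop 7 :=
            (List.takeWhile_sublist _).eq_of_length hlen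
          have := List.takeWhile_eq_self_iff.1 heq ':' hc
          simp at this
        have htw : (S.drop 7 ++ w).takeWhile (fun c => decide (c ≠ ':'))
            = (S.drop 7).takeWhile (fun c => decide (c ≠ ':')) := by
          rw [List.takeWhile_append, if_neg htwne]
        have hdw : (S.drop 7 ++ w).dropWhile (fun c => decide (c ≠ ':'))
            = (S.drop 7).dropWhile (fun c => decide (c ≠ ':')) ++ w := by
          rw [List.dropWhile_append, if_neg (by simpa using hdwne)]
        have hhead : ((S.drop 7).dropWhile (fun c => decide (c ≠ ':'))).head hdwne = ':' := by
          have := List.head_dropWhile_not (fun c => decide (c ≠ ':')) hdwne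
          simpa using this
        have hh : ((S.drop 7).dropWhile (fun c => decide (c ≠ ':'))).head? = some ':' := by
          rw [List.head?_eq_some_head hdwne, hhead]
        obtain ⟨t', ht'⟩ : ∃ t', (S.drop 7).dropWhile (fun c => decide (c ≠ ':')) = ':' :: t' := by
          rcases hdd : (S.drop 7).dropWhile (fun c => decide (c ≠ ':')) with _ | ⟨a, ta⟩
          · exact absurd hdd hdwne
          · rw [hdd, List.head?_cons, Option.some.injEq] at hh
            exact ⟨ta, by rw [hh]⟩
        have hmatch : (match (':' :: t') ++ w with
            | ':' :: t'' => t''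
            | t'' => t'') = t' ++ w := by
          rw [List.cons_append]
          rfl
        rw [htw, hdw, ht', hmatch]
        simp only [List.drop_succ_cons, List.drop_zero]
        rw [strip_append_ws hw]
      · -- no colon: the whole remainder is the name, the description is empty
        have hnoc : ∀ c ∈ S.drop 7 ++ w, (fun c => decide (c ≠ ':')) c = true := by
          intro c hcm
          simp only [decide_eq_true_eq]
          rintro rfl
          rcases List.mem_append.1 hcm with h | h
          · exact hc h
          · have := hw ':' h
            simp [PySem.Chars.isspace] at this
        have htw : (S.drop 7 ++ w).takeWhile (fun c => decide (c ≠ ':')) = S.drop 7 ++ w :=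
          List.takeWhile_eq_self_iff.2 hnoc
        have hdw : (S.drop 7 ++ w).dropWhile (fun c => decide (c ≠ ':')) = [] :=
          List.dropWhile_eq_nil_iff.2 hnoc
        have htw' : (S.drop 7).takeWhile (fun c => decide (c ≠ ':')) = S.drop 7 :=
          List.takeWhile_eq_self_iff.2 (by intro c hcm; exact hnoc c (List.mem_append_left _ hcm))
        have hdw' : (S.drop 7).dropWhile (fun c => decide (c ≠ ':')) = [] :=
          List.dropWhile_eq_nil_iff.2 (by intro c hcm; exact hnoc c (List.mem_append_left _ hcm))
        rw [htw, hdw, htw', hdw', strip_append_ws hw]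
        rfl
    · -- stripped text does not start with ':param ' although the lstripped one does:
      -- everything after the 7 matched chars is trailing whitespace, so the name strips to []
      have hS7 : S.length < 7 := by
        by_contra hge
        rw [not_lt] at hge
        have htake : ":param ".toList = (S ++ w).take 7 := by
          have := List.prefix_iff_eq_take.1 hB
          simpa using this
        rw [List.take_append_of_le_length hge] at htake
        exact hA ((PySem.Chars.startswith_iff _ _).2 (htake ▸ List.take_prefix 7 S))
      have hrem : (S ++ w).drop 7 = w.drop (7 - S.length) := by
        have h1 : (S ++ w).drop S.length = w := by simp
        conv_lhs => rw [show (7 : Nat) = S.length + (7 - S.length) by omega, ← List.drop_drop, h1]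
      have hremws : ∀ c ∈ (S ++ w).drop 7, PySem.Chars.isspace c = true := by
        intro c hcm
        rw [hrem] at hcm
        exact hw c ((List.drop_sublist _ _).subset hcm)
      have hname : PySem.Chars.strip (((S ++ w).drop 7).takeWhile (fun c => decide (c ≠ ':'))) = [] :=
        strip_of_all_ws (fun c hcm => hremws c ((List.takeWhile_sublist _).subset hcm))
      have hA' : PySem.Chars.startswith S [':', 'p', 'a', 'r', 'a', 'm', ' '] = false := by
        rw [Bool.eq_false_iff]
        exact hA
      simp only [decide_not] at hname
      simp [hA', hname]
  · rw [if_neg hB]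
    have hA : PySem.Chars.startswith S [':', 'p', 'a', 'r', 'a', 'm', ' '] = false := by
      rw [Bool.eq_false_iff]
      intro h
      exact hB (((PySem.Chars.startswith_iff _ _).1 h).trans (S.prefix_append w))
    simp [hA]

-- the two folds run the same step function
lemma fold_eq (lines : List String) (d : PySem.Dict String String) :
    lines.foldl
      (fun (d : PySem.Dict String String) line =>
        let stripped := (PySem.Str.strip line).toList
        if ¬ PySem.Chars.startswith stripped ":param ".toList then d
        else
          let remainder := (pyPartition stripped ":param ".toList).2.2
          let p := pyPartition remainder ":".toList
          let name := PySem.Chars.strip p.1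
          let description := PySem.Chars.strip p.2.2
          if name ≠ [] then d.insert (String.ofList name) (String.ofList description) else d) d
    = lines.foldl
      (fun (d : PySem.Dict String String) line =>
        match paramFullmatch line.toList with
        | none => d
        | some (g1, g2) =>
          let name := PySem.Chars.strip g1
          if name ≠ [] then d.insert (String.ofList name) (String.ofList (PySem.Chars.strip g2))
          else d) d := by
  induction lines generalizing d with
  | nil => rfl
  | cons l ls ih =>
    simp only [List.foldl_cons]
    rw [step_eq d l]
    exact ih _

-- ===== VERDICT (by name: the statement is the Claim_ definition above) =====
theorem extract_doc_fields_py_spec : Claim_equal_extract_doc_fields_py := by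
  intro doc _
  simp only [Spec_extract_doc_fields_py, extract_doc_fields_py, extract_doc_fields_py_alt]
  exact congrArg PySem.Dict.items (fold_eq _ _)
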